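-- pv_equiv track=rewrite | github.com/SchattenGenie/diff-surrogate | local_train/generate_initial_psi.py | StripFixedParams
-- ===== SOURCE A (Python) =====
-- def StripFixedParams(point):
--     stripped_point = []
--     pos = 0
--     for low, high in FIXED_RANGES:
--         stripped_point += point[:low-pos]
--         point = point[high-pos:]
--         pos = high
--     _, high = FIXED_RANGES[-1]
--     stripped_point += point[high-pos:]
--     return stripped_point
--
-- FIXED_RANGES = [(0, 2), (8, 20)]
-- ===== SOURCE B (Python) =====
-- FIXED_RANGES = [(0, 2), (8, 20)]
--
-- def StripFixedParams(point):
--     fixed = set()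
--     for low, high in FIXED_RANGES:
--         fixed |= set(range(low, high))
--     return [x for i, x in enumerate(point) if i not in fixed]
-- ===== Notes on version B (the rewrite author's own statement) =====
-- stated objective: simpler
-- what changed: Replaces A's chunked slice-concatenation with offset bookkeeping by a precomputed set of fixed indices and one element-wise filtering pass over enumerate(point).
import Mathlib
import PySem

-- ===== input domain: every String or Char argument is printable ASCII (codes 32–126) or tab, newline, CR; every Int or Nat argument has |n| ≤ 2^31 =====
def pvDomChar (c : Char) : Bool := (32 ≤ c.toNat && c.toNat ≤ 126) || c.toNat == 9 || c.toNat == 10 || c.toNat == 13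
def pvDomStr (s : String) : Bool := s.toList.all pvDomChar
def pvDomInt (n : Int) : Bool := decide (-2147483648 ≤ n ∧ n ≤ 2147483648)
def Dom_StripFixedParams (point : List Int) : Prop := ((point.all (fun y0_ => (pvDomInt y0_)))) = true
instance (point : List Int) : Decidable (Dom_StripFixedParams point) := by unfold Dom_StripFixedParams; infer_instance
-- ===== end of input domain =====

-- B replaces A's slice-concatenation with offset bookkeeping by a precomputed fixed-index set and one filtering pass (objective: simpler).

-- FIXED_RANGES = [(0, 2), (8, 20)]  (module constant, shared by both programs)
def pvFixedRanges : List (Int × Int) := [(0, 2), (8, 20)]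

-- ===== PORT A =====
-- state: (stripped_point, point, pos)
def StripFixedParams (point : List Int) : List Int :=
  let st := pvFixedRanges.foldl
    (fun (st : List Int × List Int × Int) lh =>
      (st.1 ++ PySem.List.slice st.2.1 none (some (lh.1 - st.2.2)),
       PySem.List.slice st.2.1 (some (lh.2 - st.2.2)) none,
       lh.2))
    ([], point, 0)
  let high := (PySem.List.pyGetD pvFixedRanges (-1) (0, 0)).2
  st.1 ++ PySem.List.slice st.2.1 (some (high - st.2.2)) none

-- ===== PORT B =====
-- fixed = set(); for low, high in FIXED_RANGES: fixed |= set(range(low, high))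
def pvFixedSet : PySem.Set Int :=
  pvFixedRanges.foldl
    (fun (s : PySem.Set Int) lh => PySem.Set.union s (PySem.List.pyRange lh.1 lh.2 1))
    PySem.Set.empty

-- [x for i, x in enumerate(point) if i not in fixed]
def StripFixedParams_alt (point : List Int) : List Int :=
  ((PySem.List.enumerate point 0).filter
      (fun p => !(PySem.Set.contains pvFixedSet p.1))).map (·.2)

-- ===== PRECONDITION & SPEC =====
def Spec_StripFixedParams (point : List Int) (out : List Int) : Prop := out = StripFixedParams_alt point
instance (point : List Int) (out : List Int) : Decidable (Spec_StripFixedParams point out) := by unfold Spec_StripFixedParams; infer_instance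

-- ===== CLAIM (what is proved, stated in full; the proofs are below) =====
def Claim_equal_StripFixedParams : Prop := ∀ (point : List Int), Dom_StripFixedParams point → Spec_StripFixedParams point (StripFixedParams point)

-- ===== LEMMAS AND PROOFS =====

lemma pvA_eq (p : List Int) :
    StripFixedParams p = ((p.drop 2).take 6) ++ p.drop 20 := by
  simp [StripFixedParams, pvFixedRanges, List.foldl, pysem]

lemma pvKeep (i : Int) :
    PySem.Set.contains pvFixedSet i = decide ((0 ≤ i ∧ i < 2) ∨ (8 ≤ i ∧ i < 20)) := by
  have h : pvFixedSet = [0,1,8,9,10,11,12,13,14,15,16,17,18,19] := by decide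
  rw [Bool.eq_iff_iff, decide_eq_true_eq, h, PySem.Set.contains_iff]
  simp only [List.mem_cons, List.not_mem_nil, or_false]
  constructor <;> intro hx <;> omega

lemma pvB_go (l : List Int) (s : Nat) :
    ((PySem.List.enumerate l (s : Int)).filter
        (fun p => !(PySem.Set.contains pvFixedSet p.1))).map (·.2)
      = ((l.drop (2 - s)).take ((8 - s) - (2 - s))) ++ l.drop (20 - s) := by
  induction l generalizing s with
  | nil => simp [PySem.List.enumerate]
  | cons x xs ih =>
    rw [PySem.List.enumerate_cons]
    have hc : ((s : Int) + 1) = ((s + 1 : Nat) : Int) := by push_cast; ring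
    rw [hc, List.filter_cons]
    rcases Nat.lt_or_ge s 2 with h1 | h1
    · have hk : PySem.Set.contains pvFixedSet ((s : Nat) : Int) = true := by
        rw [pvKeep]; simp; omega
      have e1 : 2 - s = (2 - (s+1)) + 1 := by omega
      have e2 : 20 - s = (20 - (s+1)) + 1 := by omega
      simp only [hk, Bool.not_true, Bool.false_eq_true, if_false, ih, e1, e2,
        List.drop_succ_cons]
      have e4 : 8 - s - (2 - (s + 1) + 1) = 8 - (s + 1) - (2 - (s + 1)) := by omega
      rw [e4]
    · rcases Nat.lt_or_ge s 8 with h2 | h2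
      · have hk : PySem.Set.contains pvFixedSet ((s : Nat) : Int) = false := by
          rw [pvKeep]; simp; omega
        have e1 : 2 - s = 0 := by omega
        have e1' : 2 - (s+1) = 0 := by omega
        have e2 : 20 - s = (20 - (s+1)) + 1 := by omega
        simp only [hk, Bool.not_false, if_true, List.map_cons, ih, e1, e1', e2,
          List.drop_succ_cons, List.drop_zero]
        have e4 : 8 - s - 0 = (8 - (s + 1) - 0) + 1 := by omega
        rw [e4, List.take_succ_cons, List.cons_append]
      · rcases Nat.lt_or_ge s 20 with h3 | h3
        · have hk : PySem.Set.contains pvFixedSet ((s : Nat) : Int) = true := by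
            rw [pvKeep]; simp; omega
          have e3 : (8 - s) - (2 - s) = 0 := by omega
          have e3' : (8 - (s+1)) - (2 - (s+1)) = 0 := by omega
          have e2 : 20 - s = (20 - (s+1)) + 1 := by omega
          simp only [hk, Bool.not_true, Bool.false_eq_true, if_false, ih, e3, e3', e2,
            List.take_zero, List.nil_append, List.drop_succ_cons]
        · have hk : PySem.Set.contains pvFixedSet ((s : Nat) : Int) = false := by
            rw [pvKeep]; simp; omega
          have e3 : (8 - s) - (2 - s) = 0 := by omega
          have e3' : (8 - (s+1)) - (2 - (s+1)) = 0 := by omega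
          have e2 : 20 - s = 0 := by omega
          have e2' : 20 - (s+1) = 0 := by omega
          simp only [hk, Bool.not_false, if_true, List.map_cons, ih, e3, e3', e2, e2',
            List.take_zero, List.nil_append, List.drop_zero]

lemma pvB_eq (p : List Int) :
    StripFixedParams_alt p = ((p.drop 2).take 6) ++ p.drop 20 := by
  have h := pvB_go p 0
  simpa [StripFixedParams_alt] using h

-- ===== VERDICT (by name: the statement is the Claim_ definition above) =====
theorem StripFixedParams_spec : Claim_equal_StripFixedParams := by
  intro p _
  unfold Spec_StripFixedParams
  rw [pvA_eq, pvB_eq]
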